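-- pv_equiv track=rewrite | github.com/re1yun/Algorithm_Study | Course/(4주) 코드/AmicableChain.py | findLongestAmicableChain
-- ===== SOURCE A (Python) =====
-- import math
--
-- def findLongestAmicableChain(n):
--     def findSarrayMultSqrt(n):
--         for a in range(2, n + 1):
--             s[a] = 1
--         for n1 in range(2, int(math.sqrt(n)) + 1):
--             for n2 in range(n1, int(n / n1) + 1):
--                 s[n1 * n2] += n1
--                 if n2 != n1: s[n1 * n2] += n2
--
--     # find longest chain
--     def recur(a):
--         if a > n: return -1
--         # if s[a] is smaller than 1, or a is already in a cycle, should return -1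
--         if result[a] != None or s[a] < 1: return -1
--
--         if a in chain: return a
--         else:
--             # add a to chain
--             chain[a] = len(chain)
--             firstElementInCycle = recur(s[a])
--             if firstElementInCycle == -1: # no cycle found that includes a
--                 result[a] = -1
--                 return -1
--             else:
--                 result[a] = s[a]
--                 # cycle found
--                 if a == firstElementInCycle:
--                     # modify chain to store the cycle
--                     # !! A -> B -> C -> D -> C 의 경우, chain = {A:0, B:1, C:2, D:3} 이므로, C를 찾아서, C부터 D까지만을 chain으로 만들어야 함
--                     # nchain: new chain
--                     nchain = []
--                     check = False
--                     for key in chain: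
--                         if check:
--                             nchain.append(key)
--                         if chain[key] == chain[a]:
--                             check = True
--                             nchain.append(key)
--                     # update longestChain
--                     if len(nchain) > len(longestChain):
--                         longestChain.clear()
--                         longestChain.extend(nchain)
--                     # else if chain and longestChain have the same length, compare lowest number in chain and longestChain
--                     elif len(nchain) == len(longestChain) and len(nchain) > 0:
--                         if min(nchain) < min(longestChain):
--                             longestChain.clear()
--                             longestChain.extend(nchain)
--                     return -1
--                 else:
--                     return firstElementInCycle
--     # define s
--     s = [0 for _ in range(n + 1)]
--     s[0] = 0
--     s[1] = 0
--     findSarrayMultSqrt(n)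
--
--
--
--     result = [None for _ in range(n + 1)]
--     chain = {}
--     longestChain = []
--     for a in range(2, n + 1):
--         chain.clear()
--         recur(a)
--     return longestChain
-- ===== SOURCE B (Python) =====
-- def findLongestAmicableChain(n):
--     # same sqrt sieve for the divisor-sum array; the chain search below is an
--     # iterative walk with an explicit path list instead of A's recursion + dict
--     s = [0] * (n + 1)
--     for a in range(2, n + 1):
--         s[a] = 1
--     n1 = 2
--     while n1 * n1 <= n:
--         for n2 in range(n1, n // n1 + 1):
--             s[n1 * n2] += n1
--             if n2 != n1:
--                 s[n1 * n2] += n2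
--         n1 += 1
--     result = [None] * (n + 1)
--     longest = []
--     for a in range(2, n + 1):
--         path = []
--         x = a
--         while x <= n and result[x] is None and s[x] >= 1 and x not in path:
--             path.append(x)
--             x = s[x]
--         if x <= n and result[x] is None and s[x] >= 1:
--             # x is in path: a cycle x -> ... -> x was reached from a
--             i = path.index(x)
--             cycle = path[i:]
--             for y in path[:i]:
--                 result[y] = -1
--             for y in cycle:
--                 result[y] = s[y]
--             if len(cycle) > len(longest) or (len(cycle) == len(longest) and min(cycle) < min(longest)):
--                 longest = cycle[:]
--         else:
--             for y in path:
--                 result[y] = -1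
--     return longest
-- ===== Notes on version B (the rewrite author's own statement) =====
-- stated objective: alternative
-- what changed: A's recursive chain-follower with a nonlocal position dict and unwinding-time memo writes is replaced by an iterative walk that records the path in a list, slices out the cycle with path.index, and post-processes memo and best-chain updates after the walk; the sqrt sieve loop is rewritten as a while loop avoiding float sqrt/division.
-- outside the precondition, e.g. on findLongestAmicableChain(0): A raises IndexError, B returns []
import Mathlib
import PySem

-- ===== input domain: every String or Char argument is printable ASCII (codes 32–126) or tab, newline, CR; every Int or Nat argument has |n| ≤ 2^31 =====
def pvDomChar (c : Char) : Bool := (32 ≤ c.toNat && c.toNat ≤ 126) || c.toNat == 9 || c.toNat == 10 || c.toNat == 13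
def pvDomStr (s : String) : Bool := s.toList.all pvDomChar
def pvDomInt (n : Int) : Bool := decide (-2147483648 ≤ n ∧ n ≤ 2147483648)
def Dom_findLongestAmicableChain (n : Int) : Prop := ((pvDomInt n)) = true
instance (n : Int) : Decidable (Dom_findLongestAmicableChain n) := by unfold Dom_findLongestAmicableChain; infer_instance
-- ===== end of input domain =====

-- B replaces A's recursive chain-follower (nonlocal dict + memo writes while unwinding) by an
-- iterative walk over an explicit path list with post-walk processing; same divisor-sum sieve,
-- written as a while loop without float sqrt/division. Objective: alternative (same cost).

-- ===== PORT A =====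
-- Port note: `int(math.sqrt(n))` is ported as `Nat.sqrt n.toNat` and `int(n / n1)` as floor
-- division `PySem.Int.floordiv n n1`; both are exact for the inputs admitted by Pre_ within
-- Dom_ (1 ≤ n ≤ 2^31, 2 ≤ n1 ≤ √n): CPython's float sqrt/division round to those integers.
-- `recur` is ported with fuel `(n+2).toNat`, which is never exhausted: each nested call inserts
-- a fresh key from [1, n] into `chain`, so the recursion depth is at most n + 1.
-- Python list indexing/assignment, Array-backed: exact for index 0 ≤ i < len — the only
-- accesses either program performs on inputs admitted by Pre_ (both programs check bounds
-- before every access, so the out-of-range/negative branches below are never taken there).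
def pyAGet {α : Type} (xs : Array α) (i : Int) (d : α) : α :=
  if 0 ≤ i then xs[i.toNat]?.getD d else d

def pyASet {α : Type} (xs : Array α) (i : Int) (v : α) : Array α :=
  if 0 ≤ i then xs.setIfInBounds i.toNat v else xs

def aSieveBody (n n1 : Int) (s : Array Int) : Array Int :=
  (PySem.List.pyRange n1 (PySem.Int.floordiv n n1 + 1) 1).foldl
    (fun s n2 =>
      let s := pyASet s (n1 * n2) (pyAGet s (n1 * n2) 0 + n1)
      if n2 ≠ n1 then pyASet s (n1 * n2) (pyAGet s (n1 * n2) 0 + n2)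
      else s) s

def aSieve (n : Int) (s : Array Int) : Array Int :=
  let s := (PySem.List.pyRange 2 (n + 1) 1).foldl (fun s a => pyASet s a 1) s
  (PySem.List.pyRange 2 ((Nat.sqrt n.toNat : Int) + 1) 1).foldl (fun s n1 => aSieveBody n n1 s) s

-- the `nchain` extraction loop (`for key in chain: …` with the `check` flag)
def aNchain (chain : PySem.Dict Int Int) (ca : Int) : List Int :=
  (chain.items.foldl (fun (st : Bool × List Int) kv =>
      let st := if st.1 then (st.1, st.2 ++ [kv.1]) else st
      if kv.2 = ca then (true, st.2 ++ [kv.1]) else st) (false, [])).2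

-- `longestChain` update (clear/extend ≡ returning the new list value)
def aUpdateLongest (nchain longest : List Int) : List Int :=
  if nchain.length > longest.length then nchain
  else if nchain.length = longest.length ∧ nchain.length > 0 then
    if (PySem.List.min? nchain (fun x => x)).getD 0 <
       (PySem.List.min? longest (fun x => x)).getD 0 then nchain else longest
  else longest

def aRecur (n : Int) (s : Array Int) :
    Nat → Int → PySem.Dict Int Int → Array (Option Int) → List Int →
    Int × PySem.Dict Int Int × Array (Option Int) × List Int
  | 0, _, chain, result, longest => (-1, chain, result, longest)  -- fuel never runs out (see note)
  | fuel + 1, a, chain, result, longest =>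
    if a > n then (-1, chain, result, longest)
    else if pyAGet result a none ≠ none ∨ pyAGet s a 0 < 1 then
      (-1, chain, result, longest)
    else if (chain.get? a).isSome then (a, chain, result, longest)
    else
      let chain := chain.insert a (chain.size : Int)
      let r := aRecur n s fuel (pyAGet s a 0) chain result longest
      let fec := r.1
      let chain := r.2.1
      let result := r.2.2.1
      let longest := r.2.2.2
      if fec = -1 then (-1, chain, pyASet result a (some (-1)), longest)
      else
        let result := pyASet result a (some (pyAGet s a 0))
        if a = fec then
          (-1, chain, result, aUpdateLongest (aNchain chain (chain.getD a 0)) longest)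
        else (fec, chain, result, longest)

def findLongestAmicableChain (n : Int) : List Int :=
  let s := Array.replicate (n + 1).toNat (0 : Int)
  let s := pyASet s 0 0
  let s := pyASet s 1 0
  let s := aSieve n s
  let result := Array.replicate (n + 1).toNat (none : Option Int)
  let st := (PySem.List.pyRange 2 (n + 1) 1).foldl
    (fun (st : PySem.Dict Int Int × Array (Option Int) × List Int) a =>
      let r := aRecur n s (n + 2).toNat a PySem.Dict.empty st.2.1 st.2.2  -- chain.clear()
      (r.2.1, r.2.2.1, r.2.2.2))
    (PySem.Dict.empty, result, [])
  st.2.2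

-- ===== PORT B =====
-- the `while n1 * n1 <= n` sieve loop, with fuel (never exhausted: at most √n iterations)
def bSieveLoop (n : Int) : Nat → Int → Array Int → Array Int
  | 0, _, s => s
  | fuel + 1, n1, s =>
    if n1 * n1 ≤ n then
      bSieveLoop n fuel (n1 + 1)
        ((PySem.List.pyRange n1 (PySem.Int.floordiv n n1 + 1) 1).foldl
          (fun s n2 =>
            let s := pyASet s (n1 * n2) (pyAGet s (n1 * n2) 0 + n1)
            if n2 ≠ n1 then pyASet s (n1 * n2) (pyAGet s (n1 * n2) 0 + n2)
            else s) s)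
    else s

-- the `while … : path.append(x); x = s[x]` walk, with fuel (never exhausted: path is ≤ n long)
def bWalk (n : Int) (s : Array Int) (result : Array (Option Int)) :
    Nat → Int → List Int → Int × List Int
  | 0, x, path => (x, path)
  | fuel + 1, x, path =>
    if x ≤ n ∧ pyAGet result x none = none ∧ 1 ≤ pyAGet s x 0 ∧ x ∉ path
    then bWalk n s result fuel (pyAGet s x 0) (path ++ [x])
    else (x, path)

def findLongestAmicableChain_alt (n : Int) : List Int :=
  let s0 := Array.replicate (n + 1).toNat (0 : Int)
  let s1 := (PySem.List.pyRange 2 (n + 1) 1).foldl (fun s a => pyASet s a 1) s0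
  let s := bSieveLoop n (n + 2).toNat 2 s1
  let result0 := Array.replicate (n + 1).toNat (none : Option Int)
  let st := (PySem.List.pyRange 2 (n + 1) 1).foldl
    (fun (st : Array (Option Int) × List Int) a =>
      let w := bWalk n s st.1 (n + 2).toNat a []
      let x := w.1
      let path := w.2
      if x ≤ n ∧ pyAGet st.1 x none = none ∧ 1 ≤ pyAGet s x 0 then
        let i := (PySem.List.index? path x).getD 0
        let cycle := PySem.List.slice path (some (i : Int)) none
        let result := (PySem.List.slice path none (some (i : Int))).foldl
          (fun r y => pyASet r y (some (-1))) st.1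
        let result := cycle.foldl
          (fun r y => pyASet r y (some (pyAGet s y 0))) result
        let longest :=
          if cycle.length > st.2.length ∨
             (cycle.length = st.2.length ∧
              (PySem.List.min? cycle (fun x => x)).getD 0 <
              (PySem.List.min? st.2 (fun x => x)).getD 0)
          then cycle else st.2
        (result, longest)
      else (path.foldl (fun r y => pyASet r y (some (-1))) st.1, st.2))
    (result0, [])
  st.2

-- ===== PRECONDITION & SPEC =====
-- Pre_ excludes n ≤ 0, on which the Python A raises IndexError while initialising `s`.
def Pre_findLongestAmicableChain (n : Int) : Prop := 1 ≤ n
instance (n : Int) : Decidable (Pre_findLongestAmicableChain n) := by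
  unfold Pre_findLongestAmicableChain; infer_instance
def pvWitness_findLongestAmicableChain : Int := 6

def Spec_findLongestAmicableChain (n : Int) (out : List Int) : Prop := out = findLongestAmicableChain_alt n
instance (n : Int) (out : List Int) : Decidable (Spec_findLongestAmicableChain n out) := by unfold Spec_findLongestAmicableChain; infer_instance

-- ===== CLAIM (what is proved, stated in full; the proofs are below) =====
def Claim_equal_findLongestAmicableChain : Prop := ∀ (n : Int), Dom_findLongestAmicableChain n → Pre_findLongestAmicableChain n → Spec_findLongestAmicableChain n (findLongestAmicableChain n)

-- ===== LEMMAS AND PROOFS =====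

-- the loop-continuation condition of both programs
abbrev Ok (n : Int) (s : Array Int) (result : Array (Option Int)) (x : Int) : Prop :=
  x ≤ n ∧ pyAGet result x none = none ∧ 1 ≤ pyAGet s x 0

-- invariant of the visited path
def PInv (n : Int) (s : Array Int) (result : Array (Option Int)) (p : List Int) : Prop :=
  p.Nodup ∧ ∀ y ∈ p, 1 ≤ y ∧ Ok n s result y

-- A's chain dict, reconstructed from the path
def chainOf (p : List Int) : PySem.Dict Int Int :=
  PySem.Dict.mk ((p.zipIdx.map (fun yi => (yi.1, (yi.2 : Int)))))

def markAll (r : Array (Option Int)) (l : List Int) (f : Int → Option Int) : Array (Option Int) :=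
  l.foldl (fun r y => pyASet r y (f y)) r

def updLong (cyc longest : List Int) : List Int :=
  if cyc.length > longest.length ∨
     (cyc.length = longest.length ∧
      (PySem.List.min? cyc (fun x => x)).getD 0 <
      (PySem.List.min? longest (fun x => x)).getD 0)
  then cyc else longest

-- what one start's processing amounts to, phrased through B's walk
def bResolve (n : Int) (s : Array Int) (fuel : Nat) (p : List Int) (a : Int)
    (result : Array (Option Int)) (longest : List Int) :
    Int × PySem.Dict Int Int × Array (Option Int) × List Int :=
  let w := bWalk n s result fuel a p
  let x := w.1
  let q := w.2
  let t := q.drop p.length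
  if Ok n s result x then
    if x ∈ p then (x, chainOf q, markAll result t (fun y => some (pyAGet s y 0)), longest)
    else
      let cyc := q.drop (List.idxOf x q)
      (-1, chainOf q,
       markAll result t (fun y => if y ∈ cyc then some (pyAGet s y 0) else some (-1)),
       updLong cyc longest)
  else (-1, chainOf q, markAll result t (fun _ => some (-1)), longest)

lemma length_le_of_inv {n : Int} {p : List Int} (hnd : p.Nodup)
    (hmem : ∀ y ∈ p, 1 ≤ y ∧ y ≤ n) : p.length ≤ n.toNat := by
  classical
  have h1 : p.toFinset.card = p.length := List.toFinset_card_of_nodup hnd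
  have h2 : p.toFinset ⊆ Finset.Icc 1 n := by
    intro y hy
    rw [List.mem_toFinset] at hy
    exact Finset.mem_Icc.mpr (hmem y hy)
  have h3 := Finset.card_le_card h2
  rw [h1, Int.card_Icc] at h3
  omega

lemma pinv_bound {n : Int} {s : Array Int} {result : Array (Option Int)} {p : List Int}
    (h : PInv n s result p) : p.length ≤ n.toNat :=
  length_le_of_inv h.1 (fun y hy => ⟨(h.2 y hy).1, (h.2 y hy).2.1⟩)

lemma pinv_snoc {n : Int} {s : Array Int} {result : Array (Option Int)} {p : List Int} {a : Int}
    (h : PInv n s result p) (ha1 : 1 ≤ a) (haOk : Ok n s result a) (hnm : a ∉ p) :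
    PInv n s result (p ++ [a]) := by
  refine ⟨?_, ?_⟩
  · rw [List.nodup_append]
    refine ⟨h.1, List.nodup_singleton a, ?_⟩
    intro y hy b hb heq
    simp only [List.mem_singleton] at hb
    subst hb; subst heq; exact hnm hy
  · intro y hy
    rcases List.mem_append.mp hy with h1 | h1
    · exact h.2 y h1
    · simp at h1; subst h1; exact ⟨ha1, haOk⟩

-- chain-dict facts
lemma chainOf_nil : chainOf [] = (PySem.Dict.empty : PySem.Dict Int Int) := rfl

lemma chainOf_keys (p : List Int) : (chainOf p).keys = p := by
  show ((p.zipIdx.map (fun yi => (yi.1, (yi.2 : Int)))).map Prod.fst) = p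
  rw [List.map_map]
  exact List.zipIdx_map_fst 0 p

lemma chainOf_get?_isSome (p : List Int) (a : Int) :
    ((chainOf p).get? a).isSome = true ↔ a ∈ p := by
  rw [← PySem.Dict.contains_eq_isSome_get?, PySem.Dict.contains_iff_mem_keys, chainOf_keys]

lemma chainOf_size (p : List Int) : (chainOf p).size = p.length := by
  show (p.zipIdx.map (fun yi => (yi.1, (yi.2 : Int)))).length = p.length
  rw [List.length_map, List.length_zipIdx]

lemma chainOf_snoc (p : List Int) (a : Int) (h : a ∉ p) :
    (chainOf p).insert a ((chainOf p).size : Int) = chainOf (p ++ [a]) := by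
  apply PySem.Dict.ext
  rw [PySem.Dict.items_insert_of_not_contains]
  · show (p.zipIdx.map _) ++ _ = ((p ++ [a]).zipIdx.map _)
    rw [List.zipIdx_append]
    simp [chainOf_size]
  · have hci : (chainOf p).contains a = true ↔ a ∈ p := by
      rw [PySem.Dict.contains_iff_mem_keys, chainOf_keys]
    rw [Bool.eq_false_iff]
    intro hc
    exact h (hci.1 hc)

lemma chainOf_getD_idxOf (q : List Int) (a : Int) (hq : q.Nodup) (ha : a ∈ q) :
    (chainOf q).getD a 0 = (List.idxOf a q : Int) := by
  have hi := List.idxOf_lt_length_of_mem ha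
  have hmem : (q[List.idxOf a q], List.idxOf a q) ∈ q.zipIdx := by
    rw [List.mem_zipIdx_iff_getElem?]; simp [hi]
  rw [List.getElem_idxOf hi] at hmem
  apply PySem.Dict.getD_of_mem_items
  · exact List.mem_map.mpr ⟨_, hmem, rfl⟩
  · rw [chainOf_keys]; exact hq

-- the nchain flag fold
def nstep (ca : Int) (st : Bool × List Int) (kv : Int × Int) : Bool × List Int :=
  let st := if st.1 then (st.1, st.2 ++ [kv.1]) else st
  if kv.2 = ca then (true, st.2 ++ [kv.1]) else st

lemma nstep_apply_true (ca : Int) (acc : List Int) (kv : Int × Int) :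
    nstep ca (true, acc) kv
      = if kv.2 = ca then (true, acc ++ [kv.1] ++ [kv.1]) else (true, acc ++ [kv.1]) := by
  simp [nstep]

lemma nstep_apply_false (ca : Int) (acc : List Int) (kv : Int × Int) :
    nstep ca (false, acc) kv
      = if kv.2 = ca then (true, acc ++ [kv.1]) else (false, acc) := by
  simp [nstep]

lemma aNchain_eq (c : PySem.Dict Int Int) (ca : Int) :
    aNchain c ca = (c.items.foldl (nstep ca) (false, [])).2 := rfl

lemma nstep_true (q : List Int) : ∀ (k ca : Nat) (acc : List Int), ca < k →
    ((q.zipIdx k).map (fun yi => (yi.1, (yi.2 : Int)))).foldl (nstep (ca : Int)) (true, acc)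
      = (true, acc ++ q) := by
  induction q with
  | nil => intro k ca acc h; simp
  | cons y t ih =>
    intro k ca acc h
    rw [List.zipIdx_cons]
    simp only [List.map_cons, List.foldl_cons]
    rw [nstep_apply_true]
    rw [if_neg (by intro hc; simp only at hc; exact absurd (by exact_mod_cast hc : k = ca) (by omega))]
    rw [ih (k+1) ca (acc ++ [y]) (by omega)]
    simp

lemma nstep_false (q : List Int) : ∀ (k ca : Nat) (acc : List Int), k ≤ ca → ca < k + q.length →
    ((q.zipIdx k).map (fun yi => (yi.1, (yi.2 : Int)))).foldl (nstep (ca : Int)) (false, acc)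
      = (true, acc ++ q.drop (ca - k)) := by
  induction q with
  | nil => intro k ca acc h1 h2; simp at h2; omega
  | cons y t ih =>
    intro k ca acc h1 h2
    rw [List.zipIdx_cons]
    simp only [List.map_cons, List.foldl_cons]
    by_cases hk : k = ca
    · subst hk
      rw [nstep_apply_false, if_pos rfl]
      rw [nstep_true t (k+1) k (acc ++ [y]) (by omega)]
      simp
    · rw [nstep_apply_false, if_neg (by intro hc; simp only at hc; exact hk (by exact_mod_cast hc))]
      rw [ih (k+1) ca acc (by omega) (by simp at h2 ⊢; omega)]
      have : ca - k = (ca - (k+1)) + 1 := by omega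
      rw [this]
      simp

lemma aNchain_chainOf (q : List Int) (i : Nat) (hi : i < q.length) :
    aNchain (chainOf q) (i : Int) = q.drop i := by
  rw [aNchain_eq]
  show ((q.zipIdx.map (fun yi => (yi.1, (yi.2 : Int)))).foldl (nstep (i : Int)) (false, [])).2 = _
  rw [nstep_false q 0 i [] (Nat.zero_le _) (by omega)]
  simp

-- marking the memo array: order and grouping do not matter
lemma pyASet_comm {α : Type} (r : Array α) {a y : Int} (v w : α)
    (h0 : 0 ≤ a) (hy : 0 ≤ y) (hay : a ≠ y) :
    pyASet (pyASet r a v) y w = pyASet (pyASet r y w) a v := by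
  unfold pyASet
  rw [if_pos h0, if_pos hy, if_pos hy, if_pos h0]
  have hne : a.toNat ≠ y.toNat := by omega
  apply Array.ext_getElem?
  intro k
  simp only [Array.getElem?_setIfInBounds, Array.size_setIfInBounds]
  split_ifs <;> first | rfl | omega

lemma pyASet_replicate_self (m : Nat) (v : Int) (i : Int) (h : 0 ≤ i) :
    pyASet (Array.replicate m v) i v = Array.replicate m v := by
  unfold pyASet
  rw [if_pos h]
  apply Array.ext_getElem?
  intro k
  simp only [Array.getElem?_setIfInBounds, Array.size_replicate, Array.getElem?_replicate]
  split_ifs <;> first | rfl | omega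

lemma markAll_cons (r : Array (Option Int)) (y : Int) (l : List Int) (f : Int → Option Int) :
    markAll r (y :: l) f = markAll (pyASet r y (f y)) l f := rfl

lemma markAll_append (r : Array (Option Int)) (l1 l2 : List Int) (f : Int → Option Int) :
    markAll r (l1 ++ l2) f = markAll (markAll r l1 f) l2 f := List.foldl_append

lemma markAll_congr {l : List Int} {f g : Int → Option Int} (r : Array (Option Int))
    (h : ∀ y ∈ l, f y = g y) : markAll r l f = markAll r l g :=
  PySem.List.foldl_congr_mem l _ _ r (fun acc x hx => by rw [h x hx])

lemma markAll_swap {l : List Int} {a : Int} (r : Array (Option Int)) (v : Option Int)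
    (f : Int → Option Int) (h0 : 0 ≤ a) (hl : ∀ y ∈ l, 0 ≤ y) (hnm : a ∉ l) :
    markAll (pyASet r a v) l f = pyASet (markAll r l f) a v := by
  induction l generalizing r with
  | nil => rfl
  | cons y t ih =>
    have hy : 0 ≤ y := hl y (by simp)
    have hay : a ≠ y := by intro hc; exact hnm (by simp [hc])
    rw [markAll_cons, markAll_cons, pyASet_comm r v (f y) h0 hy hay]
    exact ih _ (fun z hz => hl z (List.mem_cons_of_mem _ hz))
      (fun hc => hnm (List.mem_cons_of_mem _ hc))

lemma updLong_eq (cyc longest : List Int) (h : cyc ≠ []) :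
    aUpdateLongest cyc longest = updLong cyc longest := by
  have hlen : 0 < cyc.length := List.length_pos_iff.mpr h
  unfold aUpdateLongest updLong
  by_cases h1 : cyc.length > longest.length
  · rw [if_pos h1, if_pos (Or.inl h1)]
  · rw [if_neg h1]
    by_cases h2 : cyc.length = longest.length
    · rw [if_pos ⟨h2, hlen⟩]
      by_cases h3 : (PySem.List.min? cyc (fun x => x)).getD 0 <
          (PySem.List.min? longest (fun x => x)).getD 0
      · rw [if_pos h3, if_pos (Or.inr ⟨h2, h3⟩)]
      · rw [if_neg h3, if_neg (by rintro (hc | ⟨-, hc⟩) <;> [exact h1 hc; exact h3 hc])]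
    · rw [if_neg (by rintro ⟨hc, -⟩; exact h2 hc),
          if_neg (by rintro (hc | ⟨hc, -⟩) <;> [exact h1 hc; exact h2 hc])]

lemma index?_getD_of_mem {x : Int} {q : List Int} (h : x ∈ q) :
    ((PySem.List.index? q x).getD 0 : Nat) = List.idxOf x q := by
  show (List.idxOf? x q).getD 0 = _
  have : List.idxOf? x q = some (List.idxOf x q) := by
    induction q with
    | nil => simp at h
    | cons b t ih =>
      by_cases hb : b = x
      · subst hb; simp [List.idxOf?_cons, List.idxOf_cons]
      · have hx : x ∈ t := by simpa [hb, Ne.symm hb] using h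
        simp [List.idxOf?_cons, List.idxOf_cons, beq_false_of_ne hb, ih hx]
  rw [this, Option.getD_some]

lemma walk_spec (n : Int) (s : Array Int) (result : Array (Option Int)) :
    ∀ (fuel : Nat) (p : List Int) (a : Int), PInv n s result p → 1 ≤ a →
    n.toNat + 1 ≤ fuel + p.length →
    p <+: (bWalk n s result fuel a p).2 ∧ PInv n s result (bWalk n s result fuel a p).2 ∧
      1 ≤ (bWalk n s result fuel a p).1 ∧
      (Ok n s result (bWalk n s result fuel a p).1 →
        (bWalk n s result fuel a p).1 ∈ (bWalk n s result fuel a p).2) := by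
  intro fuel
  induction fuel with
  | zero =>
    intro p a hInv ha hfuel
    exact absurd (pinv_bound hInv) (by omega)
  | succ fuel ih =>
    intro p a hInv ha hfuel
    by_cases hc : a ≤ n ∧ pyAGet result a none = none ∧
        1 ≤ pyAGet s a 0 ∧ a ∉ p
    · have hW : bWalk n s result (fuel + 1) a p
          = bWalk n s result fuel (pyAGet s a 0) (p ++ [a]) := by
        simp only [bWalk]; rw [if_pos hc]
      have hInv' := pinv_snoc hInv ha ⟨hc.1, hc.2.1, hc.2.2.1⟩ hc.2.2.2
      have hres := ih (p ++ [a]) (pyAGet s a 0) hInv' hc.2.2.1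
        (by simp only [List.length_append, List.length_cons, List.length_nil]; omega)
      rw [hW]
      exact ⟨(List.prefix_append p [a]).trans hres.1, hres.2⟩
    · have hW : bWalk n s result (fuel + 1) a p = (a, p) := by
        simp only [bWalk]; rw [if_neg hc]
      rw [hW]
      refine ⟨List.prefix_refl p, hInv, ha, ?_⟩
      intro hOk
      by_contra hmem
      exact hc ⟨hOk.1, hOk.2.1, hOk.2.2, hmem⟩

lemma recur_eq (n : Int) (s : Array Int) :
    ∀ (fuel : Nat) (p : List Int) (a : Int) (result : Array (Option Int)) (longest : List Int),
    PInv n s result p → 1 ≤ a → n.toNat + 1 ≤ fuel + p.length →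
    aRecur n s fuel a (chainOf p) result longest = bResolve n s fuel p a result longest := by
  intro fuel
  induction fuel with
  | zero =>
    intro p a result longest hInv ha hfuel
    exact absurd (pinv_bound hInv) (by omega)
  | succ fuel ih =>
    intro p a result longest hInv ha hfuel
    by_cases hOk : Ok n s result a
    · by_cases hmem : a ∈ p
      · -- the walk stops at once: a is already on the path / in the chain
        have hW : bWalk n s result (fuel + 1) a p = (a, p) := by
          simp only [bWalk]
          rw [if_neg (by intro hc; exact hc.2.2.2 hmem)]
        simp only [aRecur, bResolve, hW]
        rw [if_neg (not_lt.mpr hOk.1),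
            if_neg (by rintro (hc | hc)
                       · exact hc hOk.2.1
                       · exact absurd hOk.2.2 (not_le.mpr hc)),
            if_pos ((chainOf_get?_isSome p a).2 hmem),
            if_pos hOk, if_pos hmem, List.drop_length]
        rfl
      · -- a is appended to the path and the walk / recursion continues at s[a]
        have hcond : a ≤ n ∧ pyAGet result a none = none ∧
            1 ≤ pyAGet s a 0 ∧ a ∉ p := ⟨hOk.1, hOk.2.1, hOk.2.2, hmem⟩
        have hW : bWalk n s result (fuel + 1) a p
            = bWalk n s result fuel (pyAGet s a 0) (p ++ [a]) := by
          simp only [bWalk]; rw [if_pos hcond]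
        have hInv' := pinv_snoc hInv ha hOk hmem
        have hfuel' : n.toNat + 1 ≤ fuel + (p ++ [a]).length := by
          simp only [List.length_append, List.length_cons, List.length_nil]; omega
        have hIH := ih (p ++ [a]) (pyAGet s a 0) result longest hInv' hOk.2.2 hfuel'
        obtain ⟨hpre, hInvq, hx1, hxq⟩ :=
          walk_spec n s result fuel (p ++ [a]) (pyAGet s a 0) hInv' hOk.2.2 hfuel'
        obtain ⟨rest, hrest⟩ := hpre
        -- unfold one step of A and of the outer bResolve
        simp only [aRecur, bResolve, hW]
        rw [if_neg (not_lt.mpr hOk.1),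
            if_neg (by rintro (hc | hc)
                       · exact hc hOk.2.1
                       · exact absurd hOk.2.2 (not_le.mpr hc)),
            if_neg (by intro hc; exact hmem ((chainOf_get?_isSome p a).1 hc)),
            chainOf_snoc p a hmem, hIH]
        simp only [bResolve, List.length_append, List.length_cons, List.length_nil,
          Nat.add_zero, Nat.zero_add]
        rcases hwq : bWalk n s result fuel (pyAGet s a 0) (p ++ [a]) with ⟨x, q⟩
        rw [hwq] at hInvq hx1 hxq hrest
        dsimp only at hInvq hx1 hxq hrest ⊢
        have hq : q = p ++ a :: rest := by rw [← hrest]; simp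
        have hqn : q.Nodup := hInvq.1
        have haRest : a ∉ rest := by
          have h' := hqn
          rw [← hrest, List.nodup_append] at h'
          intro hc
          exact h'.2.2 a (by simp) a hc rfl
        have hpos : ∀ y ∈ rest, 0 ≤ y := fun y hy =>
          le_trans (by norm_num) (hInvq.2 y (by rw [hq]; simp [hy])).1
        have hdropO : q.drop p.length = a :: rest := by rw [hq]; exact List.drop_left
        have hdropI : q.drop (p.length + 1) = rest := by
          rw [← hrest]
          have hl : (p ++ [a]).length = p.length + 1 := by simp
          rw [← hl]; exact List.drop_left
        rw [hdropI, hdropO]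
        by_cases hOkx : Ok n s result x
        · rw [if_pos hOkx, if_pos hOkx]
          by_cases hxa : x = a
          · subst hxa
            rw [if_pos (by simp : x ∈ p ++ [x]), if_neg hmem]
            have hxq' : x ∈ q := by rw [hq]; simp
            have hidx : List.idxOf x q = p.length := by
              rw [hq, List.idxOf_append_of_notMem hmem]
              simp [List.idxOf_cons]
            dsimp only
            rw [if_neg (by omega : ¬ x = -1), if_pos rfl,
                chainOf_getD_idxOf q x hqn hxq', hidx]
            rw [aNchain_chainOf q p.length (by rw [hq]; simp), hdropO]
            rw [updLong_eq _ _ (List.cons_ne_nil x rest)]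
            have hmk : markAll result (x :: rest)
                (fun y => if y ∈ x :: rest then some (pyAGet s y 0) else some (-1))
                = pyASet (markAll result rest
                    (fun y => some (pyAGet s y 0))) x
                    (some (pyAGet s x 0)) := by
              rw [markAll_congr result (fun y hy => if_pos hy), markAll_cons]
              exact markAll_swap result _ _ (by omega) hpos haRest
            rw [hmk]
          · by_cases hxp : x ∈ p
            · rw [if_pos (List.mem_append.mpr (Or.inl hxp)), if_pos hxp]
              dsimp only
              rw [if_neg (by omega : ¬ x = -1),
                  if_neg (fun hc => hmem (by rw [hc]; exact hxp))]
              rw [markAll_cons, markAll_swap result _ _ (by omega) hpos haRest]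
            · have hxpa : x ∉ p ++ [a] := by
                intro hc
                rcases List.mem_append.mp hc with h | h
                · exact hxp h
                · simp at h; exact hxa h
              have hxrest : x ∈ rest := by
                have hx' := hxq hOkx
                rw [hq] at hx'
                rcases List.mem_append.mp hx' with h | h
                · exact absurd h hxp
                · rcases List.mem_cons.mp h with h | h
                  · exact absurd h hxa
                  · exact h
              rw [if_neg hxpa, if_neg hxp]
              dsimp only
              rw [if_pos rfl]
              have hidx2 : List.idxOf x q = p.length + 1 + List.idxOf x rest := by
                rw [← hrest, List.idxOf_append_of_notMem hxpa]
                simp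
              have hcyc : q.drop (List.idxOf x q) = rest.drop (List.idxOf x rest) := by
                rw [hidx2, ← List.drop_drop, hdropI]
              have hacyc : a ∉ q.drop (List.idxOf x q) := by
                rw [hcyc]
                intro hc
                exact haRest (List.mem_of_mem_drop hc)
              have hmk : markAll result (a :: rest)
                  (fun y => if y ∈ q.drop (List.idxOf x q)
                            then some (pyAGet s y 0) else some (-1))
                  = pyASet (markAll result rest
                      (fun y => if y ∈ q.drop (List.idxOf x q)
                                then some (pyAGet s y 0) else some (-1))) a
                      (some (-1)) := by
                rw [markAll_cons]
                have hsw := markAll_swap (l := rest) result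
                  (if a ∈ q.drop (List.idxOf x q)
                   then some (pyAGet s a 0) else some (-1))
                  (fun y => if y ∈ q.drop (List.idxOf x q)
                            then some (pyAGet s y 0) else some (-1))
                  (by omega) hpos haRest
                rw [hsw, if_neg hacyc]
              rw [hmk]
        · rw [if_neg hOkx, if_neg hOkx]
          dsimp only
          rw [if_pos rfl, markAll_cons,
              markAll_swap result _ _ (by omega) hpos haRest]
    · -- the continuation test fails at a itself
      have hW : bWalk n s result (fuel + 1) a p = (a, p) := by
        simp only [bWalk]
        rw [if_neg (by intro hc; exact hOk ⟨hc.1, hc.2.1, hc.2.2.1⟩)]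
      simp only [bResolve, hW]
      rw [if_neg hOk, List.drop_length]
      by_cases h1 : a > n
      · simp only [aRecur]; rw [if_pos h1]; rfl
      · have h2 : pyAGet result a none ≠ none ∨ pyAGet s a 0 < 1 := by
          by_contra hc
          rw [not_or, not_not, not_lt] at hc
          exact hOk ⟨by omega, hc.1, by omega⟩
        simp only [aRecur]; rw [if_neg h1, if_pos h2]; rfl

lemma sieve_eq (n : Int) :
    ∀ (fuel : Nat) (n1 : Int), 2 ≤ n1 → Nat.sqrt n.toNat + 1 ≤ fuel + n1.toNat →
    ∀ (s : Array Int), bSieveLoop n fuel n1 s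
      = (PySem.List.pyRange n1 ((Nat.sqrt n.toNat : Int) + 1) 1).foldl
          (fun s n1 => aSieveBody n n1 s) s := by
  intro fuel
  induction fuel with
  | zero =>
    intro n1 h0 hf s
    rw [PySem.List.pyRange_one_eq_nil (by omega)]
    rfl
  | succ fuel ih =>
    intro n1 h0 hf s
    simp only [bSieveLoop]
    by_cases hc : n1 * n1 ≤ n
    · rw [if_pos hc]
      have hnn : 0 < n := lt_of_lt_of_le (by nlinarith) hc
      have hle : n1.toNat ≤ Nat.sqrt n.toNat := by
        rw [Nat.le_sqrt]
        have h1 : (n1.toNat : Int) * n1.toNat ≤ (n.toNat : Int) := by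
          have e1 : (n1.toNat : Int) = n1 := by omega
          have e2 : ((n.toNat : Int)) = n := by omega
          rw [e1, e2]; exact hc
        exact_mod_cast h1
      rw [PySem.List.pyRange_one_cons
            (a := n1) (b := ((Nat.sqrt n.toNat : Nat) : Int) + 1) (by omega),
          List.foldl_cons, ih (n1 + 1) (by omega) (by omega)]
      rfl
    · rw [if_neg hc, PySem.List.pyRange_one_eq_nil ?he]
      · rfl
      case he =>
        by_contra hlt
        rw [not_le] at hlt
        have h1 : n1.toNat ≤ Nat.sqrt n.toNat := by omega
        have h2 : n1.toNat * n1.toNat ≤ n.toNat := Nat.le_sqrt.mp h1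
        apply hc
        have h3 : (n1.toNat : Int) * n1.toNat ≤ (n.toNat : Int) := by exact_mod_cast h2
        have e1 : (n1.toNat : Int) = n1 := by omega
        rw [e1] at h3
        have h4 : (4 : Int) ≤ n1 * n1 := by nlinarith
        omega

lemma folds_eq {σ τ : Type} (F : σ × τ → Int → σ × τ) (G : τ → Int → τ) :
    ∀ (L : List Int), (∀ a ∈ L, ∀ st : σ × τ, (F st a).2 = G st.2 a) →
    ∀ st : σ × τ, (L.foldl F st).2 = L.foldl G st.2 := by
  intro L
  induction L with
  | nil => intro _ _; rfl
  | cons b t ihL =>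
    intro h st
    simp only [List.foldl_cons]
    rw [← h b (by simp) st]
    exact ihL (fun a ha st' => h a (by simp [ha]) st') (F st b)

lemma body_eq (n : Int) (s : Array Int) (hn : 1 ≤ n) (a : Int) (ha : 2 ≤ a)
    (result : Array (Option Int)) (longest : List Int) :
    ((aRecur n s (n + 2).toNat a PySem.Dict.empty result longest).2.2.1,
     (aRecur n s (n + 2).toNat a PySem.Dict.empty result longest).2.2.2)
    = (let w := bWalk n s result (n + 2).toNat a []
       let x := w.1
       let path := w.2
       if x ≤ n ∧ pyAGet result x none = none ∧ 1 ≤ pyAGet s x 0 then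
         let i := (PySem.List.index? path x).getD 0
         let cycle := PySem.List.slice path (some (i : Int)) none
         let result' := (PySem.List.slice path none (some (i : Int))).foldl
           (fun r y => pyASet r y (some (-1))) result
         let result'' := cycle.foldl
           (fun r y => pyASet r y (some (pyAGet s y 0))) result'
         let longest' :=
           if cycle.length > longest.length ∨
              (cycle.length = longest.length ∧
               (PySem.List.min? cycle (fun x => x)).getD 0 <
               (PySem.List.min? longest (fun x => x)).getD 0)
           then cycle else longest
         (result'', longest')
       else (path.foldl (fun r y => pyASet r y (some (-1))) result, longest)) := by
  have hInv0 : PInv n s result [] := ⟨List.nodup_nil, by simp⟩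
  have hfuel : n.toNat + 1 ≤ (n + 2).toNat + ([] : List Int).length := by
    simp only [List.length_nil]; omega
  have hr := recur_eq n s (n + 2).toNat [] a result longest hInv0 (by omega) hfuel
  rw [chainOf_nil] at hr
  rw [hr]
  obtain ⟨hpre, hInvq, hx1, hxq⟩ :=
    walk_spec n s result (n + 2).toNat [] a hInv0 (by omega) hfuel
  simp only [bResolve]
  rcases hwq : bWalk n s result (n + 2).toNat a [] with ⟨x, q⟩
  rw [hwq] at hInvq hx1 hxq
  dsimp only at hInvq hx1 hxq ⊢
  rw [List.length_nil, List.drop_zero]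
  by_cases hOkx : Ok n s result x
  · rw [if_pos hOkx,
        if_pos (show x ≤ n ∧ pyAGet result x none = none ∧
          1 ≤ pyAGet s x 0 from ⟨hOkx.1, hOkx.2.1, hOkx.2.2⟩),
        if_neg (List.not_mem_nil (a := x))]
    have hxq' : x ∈ q := hxq hOkx
    rw [index?_getD_of_mem hxq',
        PySem.List.slice_from_natCast q (List.idxOf x q),
        PySem.List.slice_to_natCast q (List.idxOf x q)]
    have hnd2 : (q.take (List.idxOf x q) ++ q.drop (List.idxOf x q)).Nodup := by
      rw [List.take_append_drop]; exact hInvq.1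
    rw [List.nodup_append] at hnd2
    have hmk : markAll result q
        (fun y => if y ∈ q.drop (List.idxOf x q)
                  then some (pyAGet s y 0) else some (-1))
        = markAll (markAll result (q.take (List.idxOf x q)) (fun _ => some (-1)))
            (q.drop (List.idxOf x q)) (fun y => some (pyAGet s y 0)) := by
      rw [congrArg
            (fun l => markAll result l
              (fun y => if y ∈ q.drop (List.idxOf x q)
                        then some (pyAGet s y 0) else some (-1)))
            (List.take_append_drop (List.idxOf x q) q).symm]
      rw [markAll_append]
      rw [markAll_congr (l := q.take (List.idxOf x q)) result
          (fun y hy => if_neg (fun hc => (hnd2.2.2 y hy y hc) rfl))]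
      rw [markAll_congr (l := q.drop (List.idxOf x q)) _ (fun y hy => if_pos hy)]
    rw [hmk]
    rfl
  · rw [if_neg hOkx,
        if_neg (fun hc => hOkx ⟨hc.1, hc.2.1, hc.2.2⟩)]
    rfl

-- ===== VERDICT (by name: the statement is the Claim_ definition above) =====
theorem findLongestAmicableChain_spec : Claim_equal_findLongestAmicableChain := by
  unfold Claim_equal_findLongestAmicableChain
  intro n _ hpre
  unfold Pre_findLongestAmicableChain at hpre
  unfold Spec_findLongestAmicableChain
  simp only [findLongestAmicableChain, findLongestAmicableChain_alt, aSieve]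
  have hs0 : pyASet (pyASet (Array.replicate (n + 1).toNat (0 : Int)) 0 0) 1 0
      = Array.replicate (n + 1).toNat (0 : Int) := by
    rw [pyASet_replicate_self _ _ _ (by norm_num), pyASet_replicate_self _ _ _ (by norm_num)]
  rw [hs0]
  have hsq := Nat.sqrt_le_self n.toNat
  rw [sieve_eq n (n + 2).toNat 2 (by norm_num) (by omega)]
  exact congrArg Prod.snd
    (folds_eq _ _ (PySem.List.pyRange 2 (n + 1) 1)
      (fun a hamem st =>
        body_eq n _ hpre a (PySem.List.mem_pyRange_one.mp hamem).1 st.2.1 st.2.2)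
      (PySem.Dict.empty, Array.replicate (n + 1).toNat (none : Option Int), []))
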